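-- pv_equiv track=rewrite | github.com/magnus-jx/ITMGT-25.03 | Formative Exercises - Set 4/MAGALLANES_Set4.py | telephone_cipher
-- ===== SOURCE A (Python) =====
-- def telephone_cipher(message):
--
--     encoder_dict = {
--         " ":"0",
--         "A":"2",
--         "B":"22",
--         "C":"222",
--         "D":"3",
--         "E":"33",
--         "F":"333",
--         "G":"4",
--         "H":"44",
--         "I":"444",
--         "J":"5",
--         "K":"55",
--         "L":"555",
--         "M":"6",
--         "N":"66",
--         "O":"666",
--         "P":"7",
--         "Q":"77",
--         "R":"777",
--         "S":"7777",
--         "T":"8",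
--         "U":"88",
--         "V":"888",
--         "W":"9",
--         "X":"99",
--         "Y":"999",
--         "Z":"9999"
--     }
--
--     encoded_string = ""
--
--     for i in range(len(message)):
--
--         current_char = message[i]
--
--         encoded_string += encoder_dict[current_char]
--
--         if i + 1 < len(message):
--             next_char = message[i + 1]
--
--             if next_char in encoder_dict and encoder_dict[current_char][0] == encoder_dict[next_char][0]:
--                 encoded_string += "_"
--
--     return encoded_string
-- ===== SOURCE B (Python) =====
-- def telephone_cipher(message):
--
--     encoder_dict = {
--         " ":"0",
--         "A":"2",
--         "B":"22",
--         "C":"222",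
--         "D":"3",
--         "E":"33",
--         "F":"333",
--         "G":"4",
--         "H":"44",
--         "I":"444",
--         "J":"5",
--         "K":"55",
--         "L":"555",
--         "M":"6",
--         "N":"66",
--         "O":"666",
--         "P":"7",
--         "Q":"77",
--         "R":"777",
--         "S":"7777",
--         "T":"8",
--         "U":"88",
--         "V":"888",
--         "W":"9",
--         "X":"99",
--         "Y":"999",
--         "Z":"9999"
--     }
--
--     # Group the message into maximal runs of characters sharing the same
--     # keypad key; join each run's codes with "_" and concatenate the runs.
--     parts = []
--     run = []
--     for ch in message:
--         code = encoder_dict[ch]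
--         if run and run[0][0] != code[0]:
--             parts.append("_".join(run))
--             run = [code]
--         else:
--             run.append(code)
--     if run:
--         parts.append("_".join(run))
--     return "".join(parts)
-- ===== Notes on version B (the rewrite author's own statement) =====
-- stated objective: alternative
-- what changed: A scans by index and appends an underscore separator after each character whose successor shares the keypad key; B instead groups the message into maximal same-key runs in one pass, joins each run's codes with the underscore separator and concatenates the runs.
import Mathlib
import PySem

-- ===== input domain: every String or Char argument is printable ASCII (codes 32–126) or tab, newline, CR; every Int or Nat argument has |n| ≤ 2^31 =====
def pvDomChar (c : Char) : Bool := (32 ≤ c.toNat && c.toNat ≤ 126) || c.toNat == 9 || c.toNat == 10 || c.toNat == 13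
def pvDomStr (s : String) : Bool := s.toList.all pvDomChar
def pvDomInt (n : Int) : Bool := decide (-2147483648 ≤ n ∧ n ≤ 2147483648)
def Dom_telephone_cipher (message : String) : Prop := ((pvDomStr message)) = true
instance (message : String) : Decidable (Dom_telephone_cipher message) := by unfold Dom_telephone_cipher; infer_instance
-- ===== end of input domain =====

-- B replaces A's per-index lookahead ("add '_' if the next char shares the key") by
-- grouping the message into maximal same-key runs, underscore-joining each run and
-- concatenating the runs (objective: alternative decomposition; return value only).

-- the keypad table (same literal data in both Pythons); none = KeyError
def encT (c : Char) : Option String :=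
  match c with
  | ' ' => some "0"
  | 'A' => some "2" | 'B' => some "22" | 'C' => some "222"
  | 'D' => some "3" | 'E' => some "33" | 'F' => some "333"
  | 'G' => some "4" | 'H' => some "44" | 'I' => some "444"
  | 'J' => some "5" | 'K' => some "55" | 'L' => some "555"
  | 'M' => some "6" | 'N' => some "66" | 'O' => some "666"
  | 'P' => some "7" | 'Q' => some "77" | 'R' => some "777" | 'S' => some "7777"
  | 'T' => some "8" | 'U' => some "88" | 'V' => some "888"
  | 'W' => some "9" | 'X' => some "99" | 'Y' => some "999" | 'Z' => some "9999"
  | _ => none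

-- encoder_dict[c]; the default is never reached under Pre_ (KeyError is excluded there)
def codeOf (c : Char) : String := (encT c).getD ""
-- encoder_dict[c][0]; codes are nonempty under Pre_, so headD is exact there
def keyOf (c : Char) : Char := (codeOf c).toList.headD '?'

-- ===== PORT A =====
-- the index loop `for i in range(len(message))` with the string accumulator
def loopA (l : List Char) (i : Nat) (acc : String) : String :=
  if i < l.length then
    let current := l.getD i ' '
    let acc1 := acc ++ codeOf current
    let acc2 :=
      if i + 1 < l.length then
        let next := l.getD (i + 1) ' '
        if (encT next).isSome && (keyOf current == keyOf next) then acc1 ++ "_" else acc1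
      else acc1
    loopA l (i + 1) acc2
  else acc
termination_by l.length - i

def telephone_cipher (message : String) : String :=
  loopA message.toList 0 ""

-- ===== PORT B =====
-- "_".join(run), ported by hand (exact: Python's join puts the separator between
-- consecutive elements and returns "" on the empty list)
def joinUnd : List String → String
  | [] => ""
  | [x] => x
  | x :: y :: xs => x ++ "_" ++ joinUnd (y :: xs)

-- "".join(parts), ported by hand (exact)
def joinAll : List String → String
  | [] => ""
  | x :: xs => x ++ joinAll xs

-- one step of B's loop body: extend the current run, or flush it when the key changes
def stepB (st : List String × List String) (ch : Char) : List String × List String :=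
  let code := codeOf ch
  match st with
  | (parts, run) =>
    match run with
    | [] => (parts, run ++ [code])
    | r0 :: _ =>
      if r0.toList.headD '?' ≠ code.toList.headD '?' then
        (parts ++ [joinUnd run], [code])
      else (parts, run ++ [code])

def telephone_cipher_alt (message : String) : String :=
  let st := message.toList.foldl stepB ([], [])
  joinAll (if st.2.isEmpty then st.1 else st.1 ++ [joinUnd st.2])

-- ===== PRECONDITION & SPEC =====
-- Pre_ excludes exactly the messages containing a character outside the keypad table,
-- on which the Python A raises KeyError (and B raises the same KeyError).
def Pre_telephone_cipher (message : String) : Prop :=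
  (message.toList.all (fun c => (encT c).isSome)) = true
instance (message : String) : Decidable (Pre_telephone_cipher message) := by
  unfold Pre_telephone_cipher; infer_instance

def pvWitness_telephone_cipher : String := "AB"

def Spec_telephone_cipher (message : String) (out : String) : Prop := out = telephone_cipher_alt message
instance (message : String) (out : String) : Decidable (Spec_telephone_cipher message out) := by unfold Spec_telephone_cipher; infer_instance

-- ===== CLAIM (what is proved, stated in full; the proofs are below) =====
def Claim_equal_telephone_cipher : Prop := ∀ (message : String), Dom_telephone_cipher message → Pre_telephone_cipher message → Spec_telephone_cipher message (telephone_cipher message)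

-- ===== LEMMAS AND PROOFS =====

-- A's pairwise specification: code of the char, then '_' iff the next char shares the key
def fSpec : List Char → String
  | [] => ""
  | [c] => codeOf c
  | c :: d :: rest =>
      codeOf c ++ (if (encT d).isSome && (keyOf c == keyOf d) then "_" else "") ++ fSpec (d :: rest)

-- run-relative spec: contribution of the rest of the message after a run with key k
def S : List Char → Char → String
  | [], _ => ""
  | d :: l, k => (if keyOf d = k then "_" else "") ++ codeOf d ++ S l (keyOf d)

-- B's loop with a pending nonempty run, finalized
def T : List Char → List String → String
  | [], run => joinUnd run
  | c :: l, run =>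
      if (run.headD "").toList.headD '?' ≠ (codeOf c).toList.headD '?' then
        joinUnd run ++ T l [codeOf c]
      else T l (run ++ [codeOf c])

theorem loopA_eq (n : Nat) : ∀ (l : List Char) (i : Nat) (acc : String),
    l.length - i = n → loopA l i acc = acc ++ fSpec (l.drop i) := by
  induction n with
  | zero =>
    intro l i acc h
    have hge : l.length ≤ i := by omega
    rw [loopA]
    simp [Nat.not_lt.mpr hge, List.drop_eq_nil_of_le hge, fSpec]
  | succ n ih =>
    intro l i acc h
    have hi : i < l.length := by omega
    have hdrop : l.drop i = l[i] :: l.drop (i + 1) := List.drop_eq_getElem_cons hi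
    have hget : l.getD i ' ' = l[i] := by simp [List.getD, List.getElem?_eq_getElem hi]
    rw [loopA]
    simp only [hi, if_true, hget]
    by_cases h2 : i + 1 < l.length
    · have hdrop2 : l.drop (i + 1) = l[i + 1] :: l.drop (i + 2) := List.drop_eq_getElem_cons h2
      have hget2 : l.getD (i + 1) ' ' = l[i + 1] := by
        simp [List.getD, List.getElem?_eq_getElem h2]
      rw [ih l (i + 1) _ (by omega)]
      rw [hdrop, hdrop2, fSpec]
      rw [← hdrop2]
      simp only [h2, if_true, hget2]
      split <;> simp [String.append_assoc]
    · have hnil : l.drop (i + 1) = [] := List.drop_eq_nil_of_le (by omega)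
      rw [ih l (i + 1) _ (by omega)]
      simp [h2, hdrop, hnil, fSpec]

theorem fSpec_eq_S : ∀ (l : List Char) (c : Char),
    (∀ x ∈ l, (encT x).isSome = true) → fSpec (c :: l) = codeOf c ++ S l (keyOf c) := by
  intro l
  induction l with
  | nil => intro c _; simp [fSpec, S]
  | cons d rest ih =>
    intro c hall
    have hd : (encT d).isSome = true := hall d (by simp)
    have := ih d (fun x hx => hall x (by simp [hx]))
    rw [fSpec, this, S]
    have hiff : ((encT d).isSome && (keyOf c == keyOf d)) = decide (keyOf d = keyOf c) := by
      rw [hd]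
      by_cases h : keyOf d = keyOf c
      · simp [h]
      · simp [h, Ne.symm h]
    rw [hiff]
    simp [String.append_assoc]

theorem joinAll_append_singleton (parts : List String) (s : String) :
    joinAll (parts ++ [s]) = joinAll parts ++ s := by
  induction parts with
  | nil => simp [joinAll]
  | cons p ps ih => simp [joinAll, ih, String.append_assoc]

theorem joinUnd_append_singleton : ∀ (run : List String), run ≠ [] → ∀ (x : String),
    joinUnd (run ++ [x]) = joinUnd run ++ "_" ++ x := by
  intro run
  induction run with
  | nil => intro h; exact absurd rfl h
  | cons r rs ih =>
    intro _ x
    cases rs with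
    | nil => simp [joinUnd]
    | cons s ss =>
      have := ih (by simp) x
      simp only [List.cons_append] at this ⊢
      rw [joinUnd, this, joinUnd]
      simp [String.append_assoc]

-- the state step only ever appends to `parts`
theorem foldl_stepB_split : ∀ (l : List Char) (parts run : List String),
    List.foldl stepB (parts, run) l
      = (parts ++ (List.foldl stepB (([] : List String), run) l).1,
         (List.foldl stepB (([] : List String), run) l).2) := by
  intro l
  induction l with
  | nil => intro parts run; simp
  | cons c l ih =>
    intro parts run
    rcases h1 : stepB (([] : List String), run) c with ⟨q, r⟩
    have hsplit : stepB (parts, run) c = (parts ++ q, r) := by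
      cases run with
      | nil => simp [stepB] at h1 ⊢; exact ⟨by simp [← h1.1], h1.2⟩
      | cons r0 rs =>
        simp only [stepB] at h1 ⊢
        split at h1 <;> split <;>
          simp_all
    rw [List.foldl_cons, List.foldl_cons, hsplit, h1, ih (parts ++ q) r, ih q r]
    simp [List.append_assoc]

theorem loopB_eq_T : ∀ (l : List Char) (run : List String), run ≠ [] →
    (joinAll (let st := List.foldl stepB (([] : List String), run) l
      if st.2.isEmpty then st.1 else st.1 ++ [joinUnd st.2]))
      = T l run := by
  intro l
  induction l with
  | nil =>
    intro run hne
    cases run with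
    | nil => exact absurd rfl hne
    | cons r rs => simp [T, joinAll]
  | cons c l ih =>
    intro run hne
    cases run with
    | nil => exact absurd rfl hne
    | cons r0 rs =>
      simp only [List.foldl_cons, stepB]
      rw [T]
      simp only [List.headD_cons]
      split
      · next hk =>
        simp only [List.nil_append]
        rw [foldl_stepB_split l ([joinUnd (r0 :: rs)]) [codeOf c]]
        have h2 := ih [codeOf c] (by simp)
        simp only at h2 ⊢
        split
        · next hemp =>
          rw [← h2]; simp only [hemp]
          simp [joinAll]
        · next hemp =>
          rw [← h2]; simp only [hemp]
          simp [joinAll, joinAll_append_singleton]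
      · next hk =>
        exact ih ((r0 :: rs) ++ [codeOf c]) (by simp)

theorem T_eq_S : ∀ (l : List Char) (run : List String), run ≠ [] →
    T l run = joinUnd run ++ S l ((run.headD "").toList.headD '?') := by
  intro l
  induction l with
  | nil => intro run _; simp [T, S]
  | cons c l ih =>
    intro run hne
    cases run with
    | nil => exact absurd rfl hne
    | cons r0 rs =>
      rw [T, S]
      have hkey : (codeOf c).toList.headD '?' = keyOf c := rfl
      by_cases hk : r0.toList.headD '?' = (codeOf c).toList.headD '?'
      · rw [if_neg (by simpa using hk)]
        rw [ih ((r0 :: rs) ++ [codeOf c]) (by simp)]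
        rw [joinUnd_append_singleton (r0 :: rs) (by simp) (codeOf c)]
        simp only [List.headD_cons, List.cons_append, List.headD_cons] at *
        rw [if_pos (by rw [← hkey, ← hk])]
        rw [show keyOf c = r0.toList.headD '?' from by rw [← hkey, hk]]
        simp [String.append_assoc]
      · rw [if_pos (by simpa using hk)]
        rw [ih [codeOf c] (by simp)]
        simp only [List.headD_cons]
        rw [if_neg (fun h => hk (by rw [hkey, h]))]
        rw [show keyOf c = (codeOf c).toList.headD '?' from rfl, List.headD_eq_head?_getD]
        simp [joinUnd]

-- ===== VERDICT (by name: the statement is the Claim_ definition above) =====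
theorem telephone_cipher_spec : Claim_equal_telephone_cipher := by
  intro message _ hpre
  unfold Spec_telephone_cipher telephone_cipher telephone_cipher_alt
  cases hml : message.toList with
  | nil => rw [loopA]; simp [joinAll]
  | cons c l =>
    rw [Pre_telephone_cipher, List.all_eq_true] at hpre
    have hall : ∀ x ∈ l, (encT x).isSome = true := by
      intro x hx; exact hpre x (by rw [hml]; simp [hx])
    rw [loopA_eq ((c :: l).length) (c :: l) 0 "" (by simp)]
    simp only [List.drop_zero, List.foldl_cons]
    have hstep1 : stepB (([] : List String), ([] : List String)) c = ([], [codeOf c]) := rfl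
    rw [hstep1]
    rw [loopB_eq_T l [codeOf c] (by simp)]
    rw [T_eq_S l [codeOf c] (by simp)]
    rw [fSpec_eq_S l c hall]
    simp only [List.headD_cons]
    rw [show (codeOf c).toList.headD '?' = keyOf c from rfl]
    simp [joinUnd]
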